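-- pv_equiv track=rewrite | github.com/soletree/baekjoon | 백준/Silver/1316. 그룹 단어 체커/그룹 단어 체커.py | is_group_word
-- ===== SOURCE A (Python) =====
-- def is_group_word(word):
--     previous_char = ''
--     char_set = set()
--     for char in word:
--         if char != previous_char:
--             if char in char_set:
--                 return False
--             previous_char = char
--             char_set.add(char)
--     return True
-- ===== SOURCE B (Python) =====
-- def is_group_word(word):
--     # Collapse each run of equal consecutive characters to a single key,
--     # then the word is a group word iff no key repeats.
--     keys = []
--     for c in word:
--         if not keys or keys[-1] != c:
--             keys.append(c)
--     return len(keys) == len(set(keys))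
-- ===== Notes on version B (the rewrite author's own statement) =====
-- stated objective: alternative
-- what changed: A scans once with an early-exit set-membership test keyed on the previous character; B first collapses each run of equal adjacent characters into a list of run keys and then answers len(keys) == len(set(keys)) — a build-then-compare decomposition with no early return.
import Mathlib
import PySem

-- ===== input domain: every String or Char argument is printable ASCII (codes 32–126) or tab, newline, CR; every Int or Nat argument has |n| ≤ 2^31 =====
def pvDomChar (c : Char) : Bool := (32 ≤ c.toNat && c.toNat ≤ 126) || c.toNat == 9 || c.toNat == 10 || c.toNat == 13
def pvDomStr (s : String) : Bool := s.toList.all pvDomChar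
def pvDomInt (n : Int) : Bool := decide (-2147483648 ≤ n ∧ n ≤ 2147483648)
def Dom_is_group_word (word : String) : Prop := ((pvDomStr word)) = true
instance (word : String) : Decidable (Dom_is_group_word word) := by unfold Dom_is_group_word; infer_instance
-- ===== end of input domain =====

-- B collapses each run of equal adjacent characters to one key in a single pass, then answers
-- len(keys) == len(set(keys)) — a build-then-compare decomposition instead of A's early-exit
-- set-membership loop; same O(n) cost, equal return value on every input.

-- ===== PORT A =====
-- the for-loop of A, with previous_char as Option Char (none = the initial '' matched by no char)
def pvLoopA : List Char → Option Char → PySem.Set Char → Bool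
  | [], _, _ => true
  | c :: cs, prev, cset =>
    if some c ≠ prev then
      if PySem.Set.contains cset c then false
      else pvLoopA cs (some c) (PySem.Set.add cset c)
    else pvLoopA cs prev cset

def is_group_word (word : String) : Bool :=
  pvLoopA word.toList none PySem.Set.empty

-- ===== PORT B =====
-- the keys-building loop of Source B (keys[-1] is PySem.List.pyGet? keys (-1))
def pvKeysB (l : List Char) : List Char :=
  l.foldl (fun ks c =>
    if ks.isEmpty || !(PySem.List.pyGet? ks (-1) == some c) then ks ++ [c] else ks) []

def is_group_word_alt (word : String) : Bool :=
  let keys := pvKeysB word.toList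
  decide ((keys.length : Int) = PySem.Set.len (PySem.Set.ofList keys))

-- ===== PRECONDITION & SPEC =====
def Spec_is_group_word (word : String) (out : Bool) : Prop := out = is_group_word_alt word
instance (word : String) (out : Bool) : Decidable (Spec_is_group_word word out) := by unfold Spec_is_group_word; infer_instance

-- ===== CLAIM (what is proved, stated in full; the proofs are below) =====
def Claim_equal_is_group_word : Prop := ∀ (word : String), Dom_is_group_word word → Spec_is_group_word word (is_group_word word)

-- ===== LEMMAS AND PROOFS =====

-- run keys of a list, given the key of the run currently open to the left (none = no run open)
def pvKp : Option Char → List Char → List Char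
  | _, [] => []
  | p, c :: cs => if p = some c then pvKp (some c) cs else c :: pvKp (some c) cs

theorem pvKeysB_go (l : List Char) : ∀ ks : List Char,
    l.foldl (fun ks c =>
      if ks.isEmpty || !(PySem.List.pyGet? ks (-1) == some c) then ks ++ [c] else ks) ks
    = ks ++ pvKp ks.getLast? l := by
  induction l with
  | nil => intro ks; simp [pvKp]
  | cons c cs ih =>
    intro ks
    simp only [PySem.List.pyGet?_neg_one] at ih ⊢
    simp only [List.foldl_cons]
    by_cases h : ks.getLast? = some c
    · have hne : ks ≠ [] := by rintro rfl; simp at h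
      have hcond : (ks.isEmpty || !(ks.getLast? == some c)) = false := by
        simp [h, hne]
      rw [hcond, if_neg (by simp), ih ks, h]
      simp [pvKp]
    · have hcond : (ks.isEmpty || !(ks.getLast? == some c)) = true := by
        simp [h]
      rw [hcond, if_pos rfl, ih (ks ++ [c])]
      have hl : (ks ++ [c]).getLast? = some c := by simp
      rw [hl]
      simp [pvKp, h, List.append_assoc]

theorem pvLoopA_spec (l : List Char) : ∀ (p : Option Char) (s : PySem.Set Char),
    (∀ a, p = some a → a ∈ s) →
    pvLoopA l p s = decide ((pvKp p l).Nodup ∧ ∀ c ∈ pvKp p l, c ∉ s) := by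
  induction l with
  | nil => intro p s _; simp [pvLoopA, pvKp]
  | cons c cs ih =>
    intro p s hp
    by_cases hpc : p = some c
    · subst hpc
      rw [show pvLoopA (c :: cs) (some c) s = pvLoopA cs (some c) s by simp [pvLoopA],
          show pvKp (some c) (c :: cs) = pvKp (some c) cs by simp [pvKp]]
      exact ih (some c) s hp
    · have hne : some c ≠ p := fun h => hpc h.symm
      rw [show pvLoopA (c :: cs) p s =
            (if PySem.Set.contains s c then false else pvLoopA cs (some c) (PySem.Set.add s c))
          by simp [pvLoopA, hne],
          show pvKp p (c :: cs) = c :: pvKp (some c) cs by simp [pvKp, hpc]]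
      by_cases hc : c ∈ s
      · rw [if_pos (by simp [hc])]
        have hno : ¬ ((c :: pvKp (some c) cs).Nodup ∧ ∀ x ∈ c :: pvKp (some c) cs, x ∉ s) := by
          rintro ⟨-, hall⟩; exact hall c List.mem_cons_self hc
        exact (decide_eq_false hno).symm
      · rw [if_neg (by simp [hc])]
        rw [ih (some c) (PySem.Set.add s c) (by intro a ha; injection ha with ha; subst ha; simp [PySem.Set.mem_add])]
        apply decide_eq_decide.mpr
        simp only [List.nodup_cons, List.mem_cons, PySem.Set.mem_add]
        constructor
        · rintro ⟨hn, hall⟩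
          refine ⟨⟨fun hm => by have := hall c hm; tauto, hn⟩, ?_⟩
          rintro x (rfl | hx)
          · exact hc
          · have := hall x hx; tauto
        · rintro ⟨⟨hcn, hn⟩, hall⟩
          refine ⟨hn, fun x hx => ?_⟩
          have hxs := hall x (Or.inr hx)
          have hxc : ¬ x = c := fun he => hcn (he ▸ hx)
          tauto

theorem pvFoldlAdd_le (k : List Char) : ∀ s : PySem.Set Char,
    (k.foldl PySem.Set.add s).length ≤ s.length + k.length := by
  induction k with
  | nil => intro s; simp
  | cons c cs ih =>
    intro s
    simp only [List.foldl_cons, List.length_cons]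
    have := ih (PySem.Set.add s c)
    have hlen : (PySem.Set.add s c).length ≤ s.length + 1 := by
      by_cases hc : c ∈ s <;> simp [PySem.Set.add, hc]
    omega

theorem pvFoldlAdd_len (k : List Char) : ∀ s : PySem.Set Char,
    (k.foldl PySem.Set.add s).length = s.length + k.length ↔ (k.Nodup ∧ ∀ x ∈ k, x ∉ s) := by
  induction k with
  | nil => intro s; simp
  | cons c cs ih =>
    intro s
    simp only [List.foldl_cons, List.length_cons]
    by_cases hc : c ∈ s
    · have hadd : PySem.Set.add s c = s := by
        simp [PySem.Set.add, hc]
      rw [hadd]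
      have hle := pvFoldlAdd_le cs s
      constructor
      · intro h; omega
      · rintro ⟨-, hall⟩; exact absurd hc (hall c List.mem_cons_self)
    · have hadd : PySem.Set.add s c = s ++ [c] := by
        simp [PySem.Set.add, hc]
      rw [hadd]
      have := ih (s ++ [c])
      simp only [List.length_append, List.length_singleton] at this
      rw [show List.length s + (cs.length + 1) = List.length s + 1 + cs.length by omega, this]
      simp only [List.nodup_cons, List.mem_cons, List.mem_append]
      constructor
      · rintro ⟨hn, hall⟩
        refine ⟨⟨fun hm => by have := hall c hm; tauto, hn⟩, ?_⟩
        rintro x (rfl | hx)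
        · exact hc
        · have := hall x hx; tauto
      · rintro ⟨⟨hcn, hn⟩, hall⟩
        refine ⟨hn, fun x hx => ?_⟩
        have hxs := hall x (Or.inr hx)
        have hxc : ¬ x = c := fun he => hcn (he ▸ hx)
        tauto

-- ===== VERDICT (by name: the statement is the Claim_ definition above) =====
theorem is_group_word_spec : Claim_equal_is_group_word := by
  intro word _
  unfold Spec_is_group_word is_group_word is_group_word_alt pvKeysB
  rw [pvKeysB_go, pvLoopA_spec _ _ _ (by simp)]
  simp only [List.nil_append, List.getLast?_nil]
  apply decide_eq_decide.mpr
  have h := pvFoldlAdd_len (pvKp none word.toList) []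
  simp only [List.length_nil, Nat.zero_add, List.not_mem_nil, not_false_iff, implies_true,
    and_true] at h
  have hlen : PySem.Set.len (PySem.Set.ofList (pvKp none word.toList))
      = (((pvKp none word.toList).foldl PySem.Set.add []).length : Int) := by
    rfl
  rw [hlen]
  constructor
  · rintro ⟨hn, -⟩
    exact_mod_cast (h.mpr hn).symm
  · intro he
    refine ⟨h.mp ?_, by simp [PySem.Set.empty]⟩
    exact_mod_cast he.symm
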